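-- pv_equiv track=rewrite | github.com/itsimonfredlingjack/code-cli | code_cli/ui/app.py | _parse_verify_summary
-- ===== SOURCE A (Python) =====
-- def _parse_verify_summary(output: str, passed: bool) -> str:
--     """Parse test output for a human-readable summary."""
--     # Try to find pytest-style summary
--     for line in reversed(output.splitlines()):
--         line = line.strip()
--         if "passed" in line.lower() or "failed" in line.lower():
--             if any(c.isdigit() for c in line):
--                 return f"Tests: {line}"
--     if passed:
--         return "Tests: passed"
--     return "Tests: FAILED"
-- ===== SOURCE B (Python) =====
-- def _parse_verify_summary(output: str, passed: bool) -> str: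
--     """Parse test output for a human-readable summary (forward scan, last match)."""
--     best = None
--     for raw in output.splitlines():
--         line = raw.strip()
--         low = line.lower()
--         if ("passed" in low or "failed" in low) and any(c.isdigit() for c in line):
--             best = line
--     if best is not None:
--         return f"Tests: {best}"
--     return "Tests: passed" if passed else "Tests: FAILED"
-- ===== Notes on version B (the rewrite author's own statement) =====
-- stated objective: alternative
-- what changed: Replaces the reversed-iteration early-return loop with a single forward pass that keeps the last matching stripped line in an accumulator and decides the result after the loop.
import Mathlib
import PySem

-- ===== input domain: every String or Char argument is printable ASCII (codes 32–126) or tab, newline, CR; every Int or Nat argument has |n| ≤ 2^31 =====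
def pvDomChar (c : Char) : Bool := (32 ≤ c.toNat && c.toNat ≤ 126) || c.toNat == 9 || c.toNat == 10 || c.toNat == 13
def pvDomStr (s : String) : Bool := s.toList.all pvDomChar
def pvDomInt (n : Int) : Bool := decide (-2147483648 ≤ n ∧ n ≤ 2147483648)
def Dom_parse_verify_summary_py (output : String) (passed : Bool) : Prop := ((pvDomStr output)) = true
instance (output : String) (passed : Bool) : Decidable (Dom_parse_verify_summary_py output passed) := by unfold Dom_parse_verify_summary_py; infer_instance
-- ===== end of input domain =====

-- B replaces A's reversed early-return scan with a forward pass keeping the last matching line (alternative decomposition, same cost).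


-- ===== PORT A =====
-- the 'for line in reversed(output.splitlines())' loop with early return
def pvLoopA : List String → Bool → String
  | [], passed => if passed then "Tests: passed" else "Tests: FAILED"
  | l :: rest, passed =>
    let line := PySem.Str.strip l
    if PySem.Str.isIn "passed" (PySem.Str.lower line) || PySem.Str.isIn "failed" (PySem.Str.lower line) then
      -- any(c.isdigit() for c in line): hand port, exact on the ASCII domain
      if line.toList.any PySem.Chars.isdigit then
        "Tests: " ++ line
      else pvLoopA rest passed
    else pvLoopA rest passed

def parse_verify_summary_py (output : String) (passed : Bool) : String :=
  pvLoopA (PySem.Str.splitlines output).reverse passed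

-- ===== PORT B =====
-- loop body: strip, lower, test, keep last match
def pvStepB (acc : Option String) (raw : String) : Option String :=
  let line := PySem.Str.strip raw
  let low := PySem.Str.lower line
  if (PySem.Str.isIn "passed" low || PySem.Str.isIn "failed" low)
      && line.toList.any PySem.Chars.isdigit then some line else acc

def parse_verify_summary_py_alt (output : String) (passed : Bool) : String :=
  let best := (PySem.Str.splitlines output).foldl pvStepB none
  match best with
  | some line => "Tests: " ++ line
  | none => if passed then "Tests: passed" else "Tests: FAILED"

-- ===== PRECONDITION & SPEC =====
def Spec_parse_verify_summary_py (output : String) (passed : Bool) (out : String) : Prop := out = parse_verify_summary_py_alt output passed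
instance (output : String) (passed : Bool) (out : String) : Decidable (Spec_parse_verify_summary_py output passed out) := by unfold Spec_parse_verify_summary_py; infer_instance

-- ===== CLAIM (what is proved, stated in full; the proofs are below) =====
def Claim_equal_parse_verify_summary_py : Prop := ∀ (output : String) (passed : Bool), Dom_parse_verify_summary_py output passed → Spec_parse_verify_summary_py output passed (parse_verify_summary_py output passed)

-- ===== LEMMAS AND PROOFS =====
-- the shared match predicate on a raw line
def pvMatch (raw : String) : Bool :=
  let line := PySem.Str.strip raw
  (PySem.Str.isIn "passed" (PySem.Str.lower line) || PySem.Str.isIn "failed" (PySem.Str.lower line))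
    && line.toList.any PySem.Chars.isdigit

def pvFallback (passed : Bool) : String := if passed then "Tests: passed" else "Tests: FAILED"

-- A's loop = first match of the list it walks
theorem pvLoopA_cons (x : String) (rest : List String) (passed : Bool) :
    pvLoopA (x :: rest) passed =
      if pvMatch x then "Tests: " ++ PySem.Str.strip x else pvLoopA rest passed := by
  simp only [pvLoopA, pvMatch]
  split_ifs with h1 h2 h3 h4 h5 <;> simp_all;
    · obtain ⟨c, hc, hd⟩ := h4
      exact absurd (h2 c hc) (by simp [hd])

theorem pvLoopA_eq_find (L : List String) (passed : Bool) :
    pvLoopA L passed = match L.find? pvMatch with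
      | some raw => "Tests: " ++ PySem.Str.strip raw
      | none => pvFallback passed := by
  induction L with
  | nil => rfl
  | cons x rest ih =>
    rw [pvLoopA_cons, List.find?_cons]
    cases h : pvMatch x
    · simpa [h] using ih
    · simp

-- B's fold = last match = first match of the reversed list
theorem pvStepB_eq (acc : Option String) (x : String) :
    pvStepB acc x = if pvMatch x then some (PySem.Str.strip x) else acc := rfl

theorem pvFold_eq_find (L : List String) (acc : Option String) :
    L.foldl pvStepB acc
    = match L.reverse.find? pvMatch with
      | some raw => some (PySem.Str.strip raw)
      | none => acc := by
  induction L generalizing acc with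
  | nil => rfl
  | cons x rest ih =>
    rw [List.foldl_cons, pvStepB_eq, List.reverse_cons, List.find?_append, ih]
    cases hr : rest.reverse.find? pvMatch with
    | some raw => simp
    | none =>
      rw [List.find?_cons]
      cases h : pvMatch x <;> simp

-- ===== VERDICT (by name: the statement is the Claim_ definition above) =====
theorem parse_verify_summary_py_spec : Claim_equal_parse_verify_summary_py := by
  intro output passed _
  unfold Spec_parse_verify_summary_py parse_verify_summary_py parse_verify_summary_py_alt
  rw [pvLoopA_eq_find, pvFold_eq_find]
  cases h : (PySem.Str.splitlines output).reverse.find? pvMatch <;> simp [pvFallback]
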